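-- pv_equiv track=rewrite | github.com/sOmniAbulisT/CSBDA | 01_Programming_Basic/Assignment/Assignment01.py | a1_q4
-- ===== SOURCE A (Python) =====
-- def a1_q4(numbers):
--     max_num = max(numbers)
--     min_num = min(numbers)
--     sum_number = 0
--     for i in range(len(numbers)):
--         sum_number += numbers[i]
--     answer = {"max": max_num, "min": min_num, "sum": sum_number}
--     return answer
-- ===== SOURCE B (Python) =====
-- def a1_q4(numbers):
--     mx = mn = s = numbers[0]
--     for x in numbers[1:]:
--         s += x
--         if x > mx:
--             mx = x
--         if x < mn:
--             mn = x
--     return {"max": mx, "min": mn, "sum": s}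
-- ===== Notes on version B (the rewrite author's own statement) =====
-- stated objective: simpler
-- what changed: A calls max() and min() as separate whole-list passes and then sums by indexing range(len); B makes one explicit pass seeded from the first element, updating max, min and sum together.
-- outside the precondition, e.g. on a1_q4([]): A raises ValueError, B raises IndexError
import Mathlib
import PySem

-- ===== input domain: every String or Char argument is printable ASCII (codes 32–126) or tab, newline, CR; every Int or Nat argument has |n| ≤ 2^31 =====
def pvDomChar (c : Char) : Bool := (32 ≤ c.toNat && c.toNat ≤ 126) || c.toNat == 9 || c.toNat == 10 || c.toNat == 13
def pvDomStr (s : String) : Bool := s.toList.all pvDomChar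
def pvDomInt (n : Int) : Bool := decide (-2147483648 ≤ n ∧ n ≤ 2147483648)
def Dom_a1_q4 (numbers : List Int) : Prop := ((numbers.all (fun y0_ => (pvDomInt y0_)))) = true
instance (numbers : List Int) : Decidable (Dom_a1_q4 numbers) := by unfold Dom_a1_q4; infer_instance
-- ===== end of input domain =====

-- B makes one explicit pass (seeded from the first element) instead of A's three passes (max(), min(), index-sum loop).
-- Both raise on the empty list (A: ValueError from max([]); B: IndexError from numbers[0]), so Pre_ excludes it.

-- ===== PORT A =====
def a1_q4 (numbers : List Int) : List (String × Int) :=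
  match PySem.List.max? numbers (fun x => x), PySem.List.min? numbers (fun x => x) with
  | some mx, some mn =>
      let s := (PySem.List.pyRange 0 (numbers.length : Int) 1).foldl
        (fun acc i => acc + PySem.List.pyGetD numbers i 0) 0
      [("max", mx), ("min", mn), ("sum", s)]
  | _, _ => []  -- unreachable under Pre_: max([]) raises ValueError

-- ===== PORT B =====
def a1_q4_alt (numbers : List Int) : List (String × Int) :=
  match numbers with
  | [] => []  -- numbers[0] raises IndexError in Python; outside Pre_
  | h :: t =>
      let st := t.foldl (fun (p : Int × Int × Int) x =>
        let s := p.2.2 + x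
        let mx := if x > p.1 then x else p.1
        let mn := if x < p.2.1 then x else p.2.1
        (mx, mn, s)) (h, h, h)
      [("max", st.1), ("min", st.2.1), ("sum", st.2.2)]

-- ===== PRECONDITION & SPEC =====
-- Pre_ excludes only the empty list, on which A raises ValueError (and B raises IndexError).
def Pre_a1_q4 (numbers : List Int) : Prop := numbers ≠ []
instance (numbers : List Int) : Decidable (Pre_a1_q4 numbers) := by unfold Pre_a1_q4; infer_instance
def pvWitness_a1_q4 : List Int := [3, -1, 4]

def Spec_a1_q4 (numbers : List Int) (out : List (String × Int)) : Prop := out = a1_q4_alt numbers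
instance (numbers : List Int) (out : List (String × Int)) : Decidable (Spec_a1_q4 numbers out) := by unfold Spec_a1_q4; infer_instance

-- ===== CLAIM (what is proved, stated in full; the proofs are below) =====
def Claim_equal_a1_q4 : Prop := ∀ (numbers : List Int), Dom_a1_q4 numbers → Pre_a1_q4 numbers → Spec_a1_q4 numbers (a1_q4 numbers)

-- ===== LEMMAS AND PROOFS =====

-- B's combined fold is the triple of the three separate folds
lemma alt_fold_eq (t : List Int) (a b c : Int) :
    t.foldl (fun (p : Int × Int × Int) x =>
        let s := p.2.2 + x
        let mx := if x > p.1 then x else p.1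
        let mn := if x < p.2.1 then x else p.2.1
        (mx, mn, s)) (a, b, c)
      = (t.foldl max a, t.foldl min b, t.foldl (· + ·) c) := by
  induction t generalizing a b c with
  | nil => rfl
  | cons x t ih =>
      have hmx : (if x > a then x else a) = max a x := by omega
      have hmn : (if x < b then x else b) = min b x := by omega
      simp only [List.foldl_cons, ih, hmx, hmn]

theorem a1_q4_spec_aux (h : Int) (t : List Int) :
    a1_q4 (h :: t) = a1_q4_alt (h :: t) := by
  unfold a1_q4 a1_q4_alt
  rw [PySem.List.max?_id_cons, PySem.List.min?_id_cons]
  simp only [alt_fold_eq]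
  have hs : (PySem.List.pyRange 0 ((h :: t).length : Int) 1).foldl
      (fun acc i => acc + PySem.List.pyGetD (h :: t) i 0) 0
      = (h :: t).foldl (· + ·) 0 :=
    PySem.List.foldl_pyRange_zero_pyGetD (h :: t) 0 (· + ·) 0
  simp only [hs, List.foldl_cons, Int.zero_add]

-- ===== VERDICT (by name: the statement is the Claim_ definition above) =====
theorem a1_q4_spec : Claim_equal_a1_q4 := by
  intro numbers _ hpre
  unfold Spec_a1_q4
  cases numbers with
  | nil => exact absurd rfl hpre
  | cons h t => exact a1_q4_spec_aux h t
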